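-- pv_equiv track=rewrite | github.com/haolunc/ARC-RL | reference_solutions/solutions/a61f2674.py | transform
-- ===== SOURCE A (Python) =====
-- def transform(grid):
--
--     if not grid:
--         return grid
--
--     rows = len(grid)
--     cols = len(grid[0])
--
--     col_counts = [0] * cols
--     for r in range(rows):
--         for c in range(cols):
--             if grid[r][c] == 5:
--                 col_counts[c] += 1
--
--     max_count = -1
--     max_col = None
--     for c, cnt in enumerate(col_counts):
--         if cnt > max_count:
--             max_count = cnt
--             max_col = c
--
--     min_count = float('inf')
--     min_col = None
--     for c, cnt in enumerate(col_counts):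
--         if cnt > 0 and c != max_col and cnt < min_count:
--             min_count = cnt
--             min_col = c
--
--     new_grid = []
--     for r in range(rows):
--         new_row = []
--         for c in range(cols):
--             val = grid[r][c]
--             if val == 5:
--                 if c == max_col:
--                     new_row.append(1)
--                 elif c == min_col:
--                     new_row.append(2)
--                 else:
--                     new_row.append(0)
--             else:
--                 new_row.append(val)
--         new_grid.append(new_row)
--
--     return new_grid
-- ===== SOURCE B (Python) =====
-- def transform(grid):
--     if not grid:
--         return grid
--     columns = list(zip(*grid))
--     if not columns:
--         return [[] for _ in grid]
--     key5 = lambda c: columns[c].count(5)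
--     ranked = sorted(range(len(columns)), key=lambda c: (-key5(c), c))
--     max_col = ranked[0]
--     rest = sorted((c for c in range(len(columns)) if c != max_col and key5(c) > 0),
--                   key=lambda c: (key5(c), c))
--     recolor = {max_col: 1}
--     if rest:
--         recolor[rest[0]] = 2
--     new_cols = [[recolor.get(c, 0) if v == 5 else v for v in col]
--                 for c, col in enumerate(columns)]
--     return [list(row) for row in zip(*new_cols)]
-- ===== Notes on version B (the rewrite author's own statement) =====
-- stated objective: alternative
-- what changed: B transposes the grid once with zip(*grid), ranks columns by sorting indices on the tuple key (-count5, index) and on (count5, index) and takes the heads as max_col/min_col instead of A's running-max/running-min accumulator loops, records the recoloring in a dict, recolors column-wise and transposes back, replacing A's row-major nested index loops entirely.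
import Mathlib
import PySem

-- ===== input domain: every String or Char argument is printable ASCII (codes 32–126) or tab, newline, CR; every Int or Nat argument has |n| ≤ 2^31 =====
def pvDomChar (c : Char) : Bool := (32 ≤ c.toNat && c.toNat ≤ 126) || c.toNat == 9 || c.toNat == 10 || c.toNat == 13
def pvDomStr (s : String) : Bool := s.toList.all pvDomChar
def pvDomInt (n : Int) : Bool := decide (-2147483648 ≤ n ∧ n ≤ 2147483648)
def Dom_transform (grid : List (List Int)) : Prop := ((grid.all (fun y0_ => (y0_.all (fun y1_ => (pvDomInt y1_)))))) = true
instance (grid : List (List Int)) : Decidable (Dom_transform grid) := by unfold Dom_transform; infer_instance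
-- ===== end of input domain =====

-- B replaces A's row-major nested index loops and running-max/min accumulator scans by a
-- transpose (zip(*grid)), sort-based ranking of the column indices (tuple keys), a dict of
-- recolorings, a column-wise rewrite and a transpose back (objective: alternative).

-- ===== PORT A =====
-- inner loop 'for c in range(cols): if grid[r][c] == 5: col_counts[c] += 1'
def pvInner (row : List Int) (cols : Nat) (cc : List Int) : List Int :=
  (List.range cols).foldl (fun cc c => if row.getD c 0 = 5 then cc.set c (cc.getD c 0 + 1) else cc) cc

-- 'float("inf")' as the initial min_count: none = inf, so 'cnt < min_count' is pvLtMin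
def pvLtMin (m : Option Int) (v : Int) : Bool :=
  match m with
  | none => true
  | some m => decide (v < m)

-- the col_counts loop over rows
def pvColCounts (grid : List (List Int)) : List Int :=
  (List.range grid.length).foldl
    (fun cc r => pvInner (grid.getD r []) (grid.headD []).length cc)
    (List.replicate (grid.headD []).length (0 : Int))

-- the max_count / max_col loop
def pvMaxP (cc : List Int) : Int × Option Nat :=
  cc.zipIdx.foldl (fun p x => if x.1 > p.1 then (x.1, some x.2) else p) ((-1 : Int), (none : Option Nat))

-- the min_count / min_col loop
def pvMinP (cc : List Int) (maxCol : Option Nat) : Option Int × Option Nat :=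
  cc.zipIdx.foldl
    (fun p x => if x.1 > 0 ∧ some x.2 ≠ maxCol ∧ pvLtMin p.1 x.1 = true then (some x.1, some x.2) else p)
    ((none : Option Int), (none : Option Nat))

def transform (grid : List (List Int)) : List (List Int) :=
  if grid = [] then grid else
  let rows := grid.length
  let cols := (grid.headD []).length
  let maxCol := (pvMaxP (pvColCounts grid)).2
  let minCol := (pvMinP (pvColCounts grid) maxCol).2
  (List.range rows).map (fun r => (List.range cols).map (fun c =>
    let val := (grid.getD r []).getD c 0
    if val = 5 then (if some c = maxCol then 1 else if some c = minCol then 2 else (0 : Int)) else val))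

-- ===== PORT B =====
-- 'list(zip(*g))': the columns, one per index below the SHORTEST row length (exact zip semantics)
def pvColumns (g : List (List Int)) : List (List Int) :=
  match g with
  | [] => []
  | r :: rs => (List.range (rs.foldl (fun m t => min m t.length) r.length)).map
      (fun c => (r :: rs).map (fun row => row.getD c 0))

-- 'key5 = lambda c: columns[c].count(5)'
def pvCnt5 (columns : List (List Int)) (c : Nat) : Nat :=
  PySem.List.count (columns.getD c []) 5

def transform_alt (grid : List (List Int)) : List (List Int) :=
  if grid = [] then grid else
  let columns := pvColumns grid
  if columns = [] then grid.map (fun _ => ([] : List Int)) else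
  -- ranked = sorted(range(len(columns)), key=lambda c: (-key5(c), c))
  let ranked := PySem.List.sorted2 (List.range columns.length)
      (fun c => -(pvCnt5 columns c : Int)) (fun c => c)
  let maxCol := ranked.headD 0      -- ranked[0]; ranked ≠ [] since columns ≠ []
  -- rest = sorted((c for c in range(len(columns)) if c != max_col and key5(c) > 0), key=lambda c: (key5(c), c))
  let rest := PySem.List.sorted2
      ((List.range columns.length).filter (fun c => decide (c ≠ maxCol) && decide (0 < pvCnt5 columns c)))
      (fun c => (pvCnt5 columns c : Int)) (fun c => c)
  -- recolor = {max_col: 1}; if rest: recolor[rest[0]] = 2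
  let recolor : PySem.Dict Nat Int := PySem.Dict.insert ⟨[]⟩ maxCol 1
  let recolor := if rest = [] then recolor else PySem.Dict.insert recolor (rest.headD 0) 2
  -- new_cols = [[recolor.get(c, 0) if v == 5 else v for v in col] for c, col in enumerate(columns)]
  let newCols := columns.zipIdx.map (fun p => p.1.map (fun v =>
      if v = 5 then PySem.Dict.getD recolor p.2 0 else v))
  -- return [list(row) for row in zip(*new_cols)]
  (pvColumns newCols).map (fun row => row)

-- ===== PRECONDITION & SPEC =====
-- Pre_ excludes exactly the ragged grids on which the Python A raises IndexError
-- (a row shorter than the first row); there A returns nothing to match.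
def Pre_transform (grid : List (List Int)) : Prop :=
  ∀ row ∈ grid, (grid.headD []).length ≤ row.length
instance (grid : List (List Int)) : Decidable (Pre_transform grid) := by unfold Pre_transform; infer_instance
def pvWitness_transform : List (List Int) := [[5, 0], [5, 5]]

def Spec_transform (grid : List (List Int)) (out : List (List Int)) : Prop := out = transform_alt grid
instance (grid : List (List Int)) (out : List (List Int)) : Decidable (Spec_transform grid out) := by unfold Spec_transform; infer_instance

-- ===== CLAIM (what is proved, stated in full; the proofs are below) =====
def Claim_equal_transform : Prop := ∀ (grid : List (List Int)), Dom_transform grid → Pre_transform grid → Spec_transform grid (transform grid)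

-- ===== LEMMAS AND PROOFS =====

theorem pv_getD_set (l : List Int) (i c : Nat) (v d : Int) :
    (l.set i v).getD c d = if c = i ∧ i < l.length then v else l.getD c d := by
  simp [List.getD_eq_getElem?_getD, List.getElem?_set]
  split_ifs <;> simp_all

theorem pv_getD_replicate (n c : Nat) (v d : Int) :
    (List.replicate n v).getD c d = if c < n then v else d := by
  simp [List.getD_eq_getElem?_getD, List.getElem?_replicate]
  split_ifs <;> rfl

theorem pv_zipIdx_eq (l : List Int) :
    l.zipIdx = (List.range l.length).map (fun i => (l.getD i 0, i)) := by
  apply List.ext_getElem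
  · simp
  · intro i h1 h2
    have hi : i < l.length := by simpa using h1
    simp [List.getD_eq_getElem?_getD, List.getElem_zipIdx, List.getElem?_eq_getElem hi]

theorem pv_foldl_range_getD {α β : Type} (l : List α) (d : α) (g : β → α → β) (init : β) :
    (List.range l.length).foldl (fun s r => g s (l.getD r d)) init = l.foldl g init := by
  induction l using List.reverseRecOn generalizing init with
  | nil => simp
  | append_singleton l0 a ih =>
    rw [List.length_append, List.length_singleton, List.range_succ, List.foldl_append,
        List.foldl_append]
    have hcg : (List.range l0.length).foldl (fun s r => g s ((l0 ++ [a]).getD r d)) init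
        = (List.range l0.length).foldl (fun s r => g s (l0.getD r d)) init := by
      apply PySem.List.foldl_congr_mem
      intro acc x hx
      have hx' : x < l0.length := List.mem_range.mp hx
      rw [List.getD_append _ _ _ _ hx']
    rw [hcg, ih]
    simp [List.getD_eq_getElem?_getD]

theorem pv_setfold_length (row : List Int) (cs : List Nat) (cc : List Int) :
    (cs.foldl (fun cc c => if row.getD c 0 = 5 then cc.set c (cc.getD c 0 + 1) else cc) cc).length
      = cc.length := by
  induction cs generalizing cc with
  | nil => rfl
  | cons c cs ih =>
    rw [List.foldl_cons, ih]
    split_ifs <;> simp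

theorem pvInner_getD (row : List Int) (n : Nat) (cc : List Int) (c : Nat) :
    (pvInner row n cc).getD c 0
      = cc.getD c 0 + (if c < n ∧ c < cc.length ∧ row.getD c 0 = 5 then 1 else 0) := by
  unfold pvInner
  induction n with
  | zero => simp
  | succ n ih =>
    rw [List.range_succ, List.foldl_append, List.foldl_cons, List.foldl_nil]
    by_cases hcn : c = n
    · subst hcn
      by_cases h5 : row.getD c 0 = 5
      · rw [if_pos h5, pv_getD_set, pv_setfold_length]
        by_cases hlt : c < cc.length
        · rw [if_pos ⟨rfl, hlt⟩, ih, if_neg (fun h => absurd h.1 (lt_irrefl c)),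
              if_pos ⟨Nat.lt_succ_self c, hlt, h5⟩]
          ring
        · rw [if_neg (fun h => hlt h.2), ih, if_neg (fun h => hlt h.2.1),
              if_neg (fun h => hlt h.2.1)]
      · rw [if_neg h5, ih, if_neg (fun h => h5 h.2.2), if_neg (fun h => h5 h.2.2)]
    · have hiff : (c < n + 1 ∧ c < cc.length ∧ row.getD c 0 = 5)
          ↔ (c < n ∧ c < cc.length ∧ row.getD c 0 = 5) := by
        constructor
        · rintro ⟨h1, h2⟩; exact ⟨by omega, h2⟩
        · rintro ⟨h1, h2⟩; exact ⟨by omega, h2⟩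
      rw [if_congr hiff rfl rfl, ← ih]
      by_cases h5 : row.getD n 0 = 5
      · rw [if_pos h5, pv_getD_set, if_neg (by tauto)]
      · rw [if_neg h5]

theorem pvInner_length (row : List Int) (n : Nat) (cc : List Int) :
    (pvInner row n cc).length = cc.length := pv_setfold_length row _ cc

def pvCnt (grid : List (List Int)) (c : Nat) : Int :=
  (grid.map (fun row => if row.getD c 0 = 5 then (1 : Int) else 0)).sum

theorem pv_outer_getD (g : List (List Int)) (cols : Nat) (c : Nat) (hc : c < cols) :
    ∀ (cc : List Int), cc.length = cols →
    (g.foldl (fun cc row => pvInner row cols cc) cc).getD c 0 = cc.getD c 0 + pvCnt g c := by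
  induction g with
  | nil => intro cc _; simp [pvCnt]
  | cons row g ih =>
    intro cc hlen
    rw [List.foldl_cons, ih _ (by rw [pvInner_length, hlen]), pvInner_getD]
    have : (c < cols ∧ c < cc.length ∧ row.getD c 0 = 5) ↔ row.getD c 0 = 5 := by
      constructor
      · rintro ⟨_, _, h⟩; exact h
      · intro h; exact ⟨hc, by omega, h⟩
    rw [if_congr this rfl rfl]
    simp [pvCnt]
    split_ifs <;> ring

theorem pvColCounts_getD (grid : List (List Int)) (c : Nat) (hc : c < (grid.headD []).length) :
    (pvColCounts grid).getD c 0 = pvCnt grid c := by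
  unfold pvColCounts
  rw [pv_foldl_range_getD (g := fun cc row => pvInner row (grid.headD []).length cc),
      pv_outer_getD _ _ _ hc _ (by simp), pv_getD_replicate, if_pos hc, zero_add]

theorem pvColCounts_length (grid : List (List Int)) :
    (pvColCounts grid).length = (grid.headD []).length := by
  unfold pvColCounts
  rw [pv_foldl_range_getD (g := fun cc row => pvInner row (grid.headD []).length cc)]
  have : ∀ (g : List (List Int)) (cc : List Int),
      (g.foldl (fun cc row => pvInner row (grid.headD []).length cc) cc).length = cc.length := by
    intro g
    induction g with
    | nil => intro cc; rfl
    | cons row g ih => intro cc; rw [List.foldl_cons, ih, pvInner_length]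
  rw [this]
  simp

theorem pvCnt_nonneg (grid : List (List Int)) (c : Nat) : 0 ≤ pvCnt grid c := by
  apply List.sum_nonneg
  intro x hx
  simp only [List.mem_map] at hx
  obtain ⟨row, _, rfl⟩ := hx
  split_ifs <;> norm_num

-- ---- A's running-max / running-min loops, characterised as PySem.List.max? / min? ----

theorem pv_max_fold (key : Nat → Int) :
    ∀ (cs : List Nat) (p : Int × Option Nat) (b : Option Nat),
      (∀ c ∈ cs, 0 ≤ key c) →
      p.2 = b →
      (match b with | none => p.1 = -1 | some i => p.1 = key i) →
      (cs.foldl (fun p c => if key c > p.1 then (key c, some c) else p) p).2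
        = cs.foldl (fun acc c => match acc with
            | none => some c
            | some m => if key m < key c then some c else some m) b := by
  intro cs
  induction cs with
  | nil => intro p b _ h2 _; simpa using h2
  | cons c cs ih =>
    intro p b hnn h2 h3
    rw [List.foldl_cons, List.foldl_cons]
    cases b with
    | none =>
      have hp1 : p.1 = -1 := h3
      rw [if_pos (by rw [hp1]; have := hnn c (by simp); omega)]
      exact ih _ _ (fun x hx => hnn x (by simp [hx])) rfl rfl
    | some i =>
      have hp1 : p.1 = key i := h3
      show _ = List.foldl _ (if key i < key c then some c else some i) cs
      by_cases hlt : key i < key c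
      · rw [if_pos (by rw [hp1]; exact hlt), if_pos hlt]
        exact ih _ _ (fun x hx => hnn x (by simp [hx])) rfl rfl
      · rw [if_neg (by rw [hp1]; exact hlt), if_neg hlt]
        exact ih _ _ (fun x hx => hnn x (by simp [hx])) h2 h3

theorem pv_min_fold (key : Nat → Int) :
    ∀ (cs : List Nat) (p : Option Int × Option Nat) (b : Option Nat),
      p.2 = b →
      (match b with | none => p.1 = none | some i => p.1 = some (key i)) →
      (cs.foldl (fun p c => if pvLtMin p.1 (key c) = true then (some (key c), some c) else p) p).2
        = cs.foldl (fun acc c => match acc with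
            | none => some c
            | some m => if key c < key m then some c else some m) b := by
  intro cs
  induction cs with
  | nil => intro p b h2 _; simpa using h2
  | cons c cs ih =>
    intro p b h2 h3
    rw [List.foldl_cons, List.foldl_cons]
    cases b with
    | none =>
      have hp1 : p.1 = none := h3
      rw [if_pos (by rw [hp1]; rfl)]
      exact ih _ _ rfl rfl
    | some i =>
      have hp1 : p.1 = some (key i) := h3
      show _ = List.foldl _ (if key c < key i then some c else some i) cs
      by_cases hlt : key c < key i
      · rw [if_pos (by rw [hp1]; simpa [pvLtMin] using hlt), if_pos hlt]
        exact ih _ _ rfl rfl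
      · rw [if_neg (by rw [hp1]; simpa [pvLtMin] using hlt), if_neg hlt]
        exact ih _ _ h2 h3

theorem pv_filter_fold {β : Type} (P : Nat → Prop) [DecidablePred P] (Q : β → Nat → Prop)
    [inst : ∀ s c, Decidable (Q s c)] (f : β → Nat → β) :
    ∀ (cs : List Nat) (s : β),
      cs.foldl (fun s c => if P c ∧ Q s c then f s c else s) s
        = (cs.filter (fun c => decide (P c))).foldl (fun s c => if Q s c then f s c else s) s := by
  intro cs
  induction cs with
  | nil => intro s; rfl
  | cons c cs ih =>
    intro s
    rw [List.foldl_cons, List.filter_cons]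
    by_cases hP : P c
    · rw [if_congr (and_iff_right hP) rfl rfl, ih]
      simp only [hP, decide_true, if_true, List.foldl_cons]
    · rw [if_neg (fun h => hP h.1), ih]
      simp [hP]

def pvEligible (counts : List Int) (cols : Nat) (maxCol : Option Nat) : List Nat :=
  (List.range cols).filter (fun c => decide (counts.getD c 0 > 0) && decide (some c ≠ maxCol))

def pvCounts (grid : List (List Int)) : List Int :=
  (List.range (grid.headD []).length).map (fun c => pvCnt grid c)

theorem pvCounts_getD (grid : List (List Int)) (c : Nat) (hc : c < (grid.headD []).length) :
    (pvCounts grid).getD c 0 = pvCnt grid c :=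
  PySem.List.getD_map_range _ _ _ _ hc

theorem pvMax_eq (grid : List (List Int)) :
    (pvMaxP (pvColCounts grid)).2
      = PySem.List.max? (List.range (grid.headD []).length)
          (fun c => (pvCounts grid).getD c 0) := by
  unfold pvMaxP
  rw [pv_zipIdx_eq, List.foldl_map, pvColCounts_length]
  have hcong : (List.range (grid.headD []).length).foldl
      (fun p i => if ((pvColCounts grid).getD i 0, i).1 > p.1
        then (((pvColCounts grid).getD i 0, i).1, some ((pvColCounts grid).getD i 0, i).2) else p)
      ((-1 : Int), (none : Option Nat))
    = (List.range (grid.headD []).length).foldl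
      (fun p c => if (pvCounts grid).getD c 0 > p.1 then ((pvCounts grid).getD c 0, some c) else p)
      ((-1 : Int), (none : Option Nat)) := by
    apply PySem.List.foldl_congr_mem
    intro acc x hx
    have hx' : x < (grid.headD []).length := List.mem_range.mp hx
    have h : (pvColCounts grid).getD x 0 = (pvCounts grid).getD x 0 :=
      (pvColCounts_getD grid x hx').trans (pvCounts_getD grid x hx').symm
    simp only [h]
  rw [hcong]
  rw [pv_max_fold (fun c => (pvCounts grid).getD c 0) _ _ none ?hnn rfl rfl]
  · simp only [PySem.List.max?]
    exact PySem.List.foldl_congr_mem _ _ _ _ (fun acc x _ => by cases acc <;> rfl)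
  case hnn =>
    intro c hc
    show 0 ≤ (pvCounts grid).getD c 0
    rw [pvCounts_getD grid c (List.mem_range.mp hc)]
    exact pvCnt_nonneg grid c

theorem pvMin_eq (grid : List (List Int)) (M : Option Nat) :
    (pvMinP (pvColCounts grid) M).2
      = PySem.List.min? (pvEligible (pvCounts grid) (grid.headD []).length M)
          (fun c => (pvCounts grid).getD c 0) := by
  unfold pvMinP
  rw [pv_zipIdx_eq, List.foldl_map, pvColCounts_length]
  have hcong : (List.range (grid.headD []).length).foldl
      (fun p x => if ((pvColCounts grid).getD x 0, x).1 > 0 ∧ some ((pvColCounts grid).getD x 0, x).2 ≠ M ∧ pvLtMin p.1 ((pvColCounts grid).getD x 0, x).1 = true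
        then (some ((pvColCounts grid).getD x 0, x).1, some ((pvColCounts grid).getD x 0, x).2) else p)
      ((none : Option Int), (none : Option Nat))
    = (List.range (grid.headD []).length).foldl
      (fun p c => if ((pvCounts grid).getD c 0 > 0 ∧ some c ≠ M) ∧ pvLtMin p.1 ((pvCounts grid).getD c 0) = true
        then (some ((pvCounts grid).getD c 0), some c) else p)
      ((none : Option Int), (none : Option Nat)) := by
    apply PySem.List.foldl_congr_mem
    intro acc x hx
    have hx' : x < (grid.headD []).length := List.mem_range.mp hx
    have h : (pvColCounts grid).getD x 0 = (pvCounts grid).getD x 0 :=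
      (pvColCounts_getD grid x hx').trans (pvCounts_getD grid x hx').symm
    simp only [h, and_assoc]
  rw [hcong]
  rw [pv_filter_fold (fun c => (pvCounts grid).getD c 0 > 0 ∧ some c ≠ M)
        (fun p c => pvLtMin p.1 ((pvCounts grid).getD c 0) = true)
        (fun p c => (some ((pvCounts grid).getD c 0), some c))]
  have hfil : (List.range (grid.headD []).length).filter
        (fun c => decide ((pvCounts grid).getD c 0 > 0 ∧ some c ≠ M))
      = pvEligible (pvCounts grid) (grid.headD []).length M := by
    unfold pvEligible
    apply List.filter_congr
    intro x _
    simp [Bool.decide_and]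
  rw [hfil]
  rw [pv_min_fold (fun c => (pvCounts grid).getD c 0) _ _ none rfl rfl]
  simp only [PySem.List.min?]
  exact PySem.List.foldl_congr_mem _ _ _ _ (fun acc x _ => by cases acc <;> rfl)

-- ---- B-side lemmas ----

theorem pv_foldl_min_const (l : List (List Int)) (a : Nat) (h : ∀ t ∈ l, a ≤ t.length) :
    l.foldl (fun m t => min m t.length) a = a := by
  induction l generalizing a with
  | nil => rfl
  | cons t l ih =>
    rw [List.foldl_cons, min_eq_left (h t (by simp))]
    exact ih a (fun s hs => h s (by simp [hs]))

theorem pvColumns_eq (g : List (List Int)) (hne : g ≠ []) (k : Nat)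
    (hhead : (g.headD []).length = k) (hall : ∀ t ∈ g, k ≤ t.length) :
    pvColumns g = (List.range k).map (fun c => g.map (fun row => row.getD c 0)) := by
  cases g with
  | nil => exact absurd rfl hne
  | cons r rs =>
    have hr : r.length = k := by simpa using hhead
    simp only [pvColumns]
    rw [hr, pv_foldl_min_const rs k (fun t ht => hall t (by simp [ht]))]

theorem pv_getD_map {α β : Type} (l : List α) (f : α → β) (i : Nat) (d : α) (db : β)
    (h : i < l.length) : (l.map f).getD i db = f (l.getD i d) := by
  simp [List.getD_eq_getElem?_getD, List.getElem?_eq_getElem h]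

theorem pv_zipIdx_map_range {β : Type} (n : Nat) (f : Nat → β) :
    ((List.range n).map f).zipIdx = (List.range n).map (fun c => (f c, c)) := by
  apply List.ext_getElem
  · simp
  · intro i h1 h2
    have hi : i < n := by simpa using h1
    simp [List.getElem_zipIdx]

theorem pv_count_col (grid : List (List Int)) (c : Nat) :
    ((PySem.List.count (grid.map (fun row => row.getD c 0)) 5 : Nat) : Int) = pvCnt grid c := by
  unfold pvCnt
  induction grid with
  | nil => simp [PySem.List.count]
  | cons r g ih =>
    simp only [PySem.List.count] at ih ⊢
    rw [List.map_cons, List.map_cons, List.sum_cons, List.count_cons]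
    by_cases h5 : r.getD c 0 = 5
    · simp only [h5, if_pos, beq_self_eq_true]
      push_cast
      omega
    · rw [if_neg h5, if_neg (by simpa using h5)]
      push_cast
      omega

-- max? is min? of the negated key (both keep the FIRST extremum)
theorem pv_max?_eq_min?_neg (xs : List Nat) (f : Nat → Int) :
    PySem.List.max? xs f = PySem.List.min? xs (fun c => -(f c)) := by
  simp only [PySem.List.max?, PySem.List.min?]
  apply PySem.List.foldl_congr_mem
  intro acc x _
  cases acc with
  | none => rfl
  | some m =>
    show (if f m < f x then some x else some m) = (if -(f x) < -(f m) then some x else some m)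
    exact if_congr (by omega) rfl rfl

theorem pv_min_fold_char (f : Nat → Int) :
    ∀ (t : List Nat), t.Pairwise (· < ·) → ∀ (a : Nat) (m : Nat),
      t.foldl (fun acc x => match acc with
          | none => some x
          | some m' => if f x < f m' then some x else some m') (some a) = some m →
      (∀ y ∈ t, a < y) →
      (m = a ∨ m ∈ t) ∧ f m ≤ f a ∧ (∀ y ∈ t, f m ≤ f y) ∧ (m ≠ a → f m < f a)
        ∧ (∀ y ∈ t, y < m → f m < f y) := by
  intro t
  induction t with
  | nil =>
    intro _ a m h _
    simp at h
    subst h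
    exact ⟨Or.inl rfl, le_refl _, by simp, fun h => absurd rfl h, by simp⟩
  | cons y ys ih =>
    intro hp a m h ha
    obtain ⟨hy, hys⟩ := List.pairwise_cons.mp hp
    rw [List.foldl_cons] at h
    have hred : (match some a with
        | none => some y
        | some m' => if f y < f m' then some y else some m') = if f y < f a then some y else some a := rfl
    rw [hred] at h
    by_cases hlt : f y < f a
    · rw [if_pos hlt] at h
      obtain ⟨h1, h2, h3, h4, h5⟩ := ih hys y m h hy
      refine ⟨Or.inr (by rcases h1 with h1 | h1 <;> simp [h1]), by omega,
        ?_, fun _ => by omega, ?_⟩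
      · intro z hz
        rcases List.mem_cons.mp hz with rfl | hz
        · exact h2
        · exact h3 z hz
      · intro z hz hzm
        rcases List.mem_cons.mp hz with rfl | hz
        · exact h4 (by omega)
        · exact h5 z hz hzm
    · rw [if_neg hlt] at h
      obtain ⟨h1, h2, h3, h4, h5⟩ := ih hys a m h (fun z hz => ha z (by simp [hz]))
      have hay : a < y := ha y (by simp)
      refine ⟨by rcases h1 with h1 | h1 <;> simp [h1], h2, ?_, h4, ?_⟩
      · intro z hz
        rcases List.mem_cons.mp hz with rfl | hz
        · omega
        · exact h3 z hz
      · intro z hz hzm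
        rcases List.mem_cons.mp hz with rfl | hz
        · have hma : m ≠ a := by omega
          have := h4 hma
          omega
        · exact h5 z hz hzm

theorem pv_min?_char (f : Nat → Int) (xs : List Nat) (hp : xs.Pairwise (· < ·)) (m : Nat)
    (h : PySem.List.min? xs f = some m) :
    m ∈ xs ∧ (∀ y ∈ xs, f m ≤ f y) ∧ (∀ y ∈ xs, y < m → f m < f y) := by
  cases xs with
  | nil => simp [PySem.List.min?] at h
  | cons x t =>
    have key : PySem.List.min? (x :: t) f = t.foldl (fun acc x => match acc with
        | none => some x
        | some m' => if f x < f m' then some x else some m') (some x) := by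
      simp only [PySem.List.min?, List.foldl_cons]
      exact PySem.List.foldl_congr_mem _ _ _ _ (fun acc z _ => by cases acc <;> rfl)
    have h' := key.symm.trans h
    obtain ⟨hx, ht⟩ := List.pairwise_cons.mp hp
    obtain ⟨h1, h2, h3, h4, h5⟩ := pv_min_fold_char f t ht x m h' hx
    refine ⟨by rcases h1 with h1 | h1 <;> simp [h1], ?_, ?_⟩
    · intro z hz
      rcases List.mem_cons.mp hz with rfl | hz
      · exact h2
      · exact h3 z hz
    · intro z hz hzm
      rcases List.mem_cons.mp hz with rfl | hz
      · exact h4 (by omega)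
      · exact h5 z hz hzm

theorem pv_min?_eq_foldl (f : Nat → Int) (xs : List Nat) :
    PySem.List.min? xs f = xs.foldl (fun acc x => match acc with
      | none => some x
      | some m' => if f x < f m' then some x else some m') none := by
  simp only [PySem.List.min?]
  exact PySem.List.foldl_congr_mem _ _ _ _ (fun acc z _ => by cases acc <;> rfl)

theorem pv_foldl_min_congr (f g : Nat → Int) (xs : List Nat) (h : ∀ x ∈ xs, f x = g x) :
    ∀ (acc : Option Nat), (∀ a, acc = some a → f a = g a) →
    xs.foldl (fun acc x => match acc with
      | none => some x
      | some m' => if f x < f m' then some x else some m') acc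
      = xs.foldl (fun acc x => match acc with
      | none => some x
      | some m' => if g x < g m' then some x else some m') acc := by
  induction xs with
  | nil => intro acc _; rfl
  | cons x t ih =>
    intro acc hacc
    rw [List.foldl_cons, List.foldl_cons]
    have hfx : f x = g x := h x (by simp)
    cases acc with
    | none =>
      exact ih (fun z hz => h z (by simp [hz])) (some x)
        (fun a ha => by injection ha with ha; subst ha; exact hfx)
    | some b =>
      have hfb : f b = g b := hacc b rfl
      have hstep : (match some b with
          | none => some x
          | some m' => if f x < f m' then some x else some m')
          = (match (some b : Option Nat) with
          | none => some x
          | some m' => if g x < g m' then some x else some m') := by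
        show (if f x < f b then some x else some b) = (if g x < g b then some x else some b)
        rw [hfx, hfb]
      rw [hstep]
      refine ih (fun z hz => h z (by simp [hz])) _ (fun a ha => ?_)
      have hred2 : (match (some b : Option Nat) with
          | none => some x
          | some m' => if g x < g m' then some x else some m')
          = if g x < g b then some x else some b := rfl
      rw [hred2] at ha
      by_cases hlt : g x < g b
      · rw [if_pos hlt] at ha; injection ha with ha; subst ha; exact hfx
      · rw [if_neg hlt] at ha; injection ha with ha; subst ha; exact hfb

theorem pv_min?_congr (xs : List Nat) (f g : Nat → Int) (h : ∀ x ∈ xs, f x = g x) :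
    PySem.List.min? xs f = PySem.List.min? xs g := by
  rw [pv_min?_eq_foldl, pv_min?_eq_foldl]
  exact pv_foldl_min_congr f g xs h none (by simp)

theorem pv_sorted2_eq_sorted (xs : List Nat) (f : Nat → Int) :
    PySem.List.sorted2 xs f (fun c => c)
      = PySem.List.sorted xs (fun c => toLex (f c, c)) := by
  have hb : (fun a b : Nat => decide (f a < f b) || !decide (f b < f a) && decide (a < b))
      = (fun a b : Nat => decide (toLex (f a, a) < toLex (f b, b))) := by
    funext a b
    by_cases h1 : f a < f b <;> by_cases h2 : f b < f a <;> by_cases h3 : a < b <;>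
      simp [h1, h2, h3, Prod.Lex.toLex_lt_toLex] <;> omega
  simp only [PySem.List.sorted2, PySem.List.sorted, if_neg (by decide : ¬ (false = true)), hb]

theorem pv_head_sorted2 (xs : List Nat) (hp : xs.Pairwise (· < ·)) (f : Nat → Int)
    (m r : Nat) (t : List Nat)
    (hm : PySem.List.min? xs f = some m)
    (hs : PySem.List.sorted2 xs f (fun c => c) = r :: t) : r = m := by
  rw [pv_sorted2_eq_sorted] at hs
  have hkey := PySem.List.key_head_sorted_le xs (fun c => toLex (f c, c)) hs
  have hrmem : r ∈ xs := (PySem.List.sorted_perm xs (fun c => toLex (f c, c)) false).subset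
    (by rw [hs]; exact List.mem_cons_self)
  obtain ⟨hmmem, hmin, hfirst⟩ := pv_min?_char f xs hp m hm
  have h1 : toLex (f r, r) ≤ toLex (f m, m) := hkey m hmmem
  have h2 : f m ≤ f r := hmin r hrmem
  rcases Prod.Lex.toLex_le_toLex.mp h1 with hlt | ⟨heq, hle⟩
  · exact absurd hlt (not_lt.mpr h2)
  · rcases eq_or_lt_of_le hle with heq2 | hlt2
    · exact heq2
    · have := hfirst r hrmem hlt2
      omega

-- the dict {max_col: 1} / {max_col: 1, min_col: 2} as a lookup table
theorem pv_tbl1 (M c : Nat) :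
    PySem.Dict.getD (PySem.Dict.insert (⟨[]⟩ : PySem.Dict Nat Int) M 1) c 0
      = if c = M then 1 else 0 := by
  by_cases h : c = M
  · simp [PySem.Dict.insert, PySem.Dict.getD, PySem.Dict.get?, PySem.Dict.contains, h]
  · simp [PySem.Dict.insert, PySem.Dict.getD, PySem.Dict.get?, PySem.Dict.contains, h, Ne.symm h]

theorem pv_tbl2 (M r c : Nat) (hne : r ≠ M) :
    PySem.Dict.getD (PySem.Dict.insert (PySem.Dict.insert (⟨[]⟩ : PySem.Dict Nat Int) M 1) r 2) c 0
      = if c = M then 1 else if c = r then 2 else 0 := by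
  have hMr : ¬ (M = r) := fun hh => hne hh.symm
  by_cases h1 : c = M
  · by_cases h2 : c = r
    · exact absurd (h2.symm.trans h1) hne
    · simp [PySem.Dict.insert, PySem.Dict.getD, PySem.Dict.get?, PySem.Dict.contains,
        hMr, h1]
  · by_cases h2 : c = r
    · simp [PySem.Dict.insert, PySem.Dict.getD, PySem.Dict.get?, PySem.Dict.contains,
        hMr, h2, hne]
    · simp [PySem.Dict.insert, PySem.Dict.getD, PySem.Dict.get?, PySem.Dict.contains,
        hMr, h1, h2, Ne.symm h1, Ne.symm h2]

theorem pv_headD_map_range {β : Type} (n : Nat) (f : Nat → β) (d : β) (h : n ≠ 0) :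
    ((List.range n).map f).headD d = f 0 := by
  cases n with
  | zero => omega
  | succ k => rw [List.range_succ_eq_map]; simp

theorem transform_equal (grid : List (List Int)) (hpre : Pre_transform grid) :
    transform grid = transform_alt grid := by
  by_cases hg : grid = []
  · simp [transform, transform_alt, hg]
  · rw [transform, transform_alt, if_neg hg, if_neg hg]
    dsimp only
    have hcolumns := pvColumns_eq grid hg _ rfl hpre
    by_cases hc0 : (grid.headD []).length = 0
    · rw [hcolumns, hc0]
      simp [List.map_const', List.length_range]
    · set n := (grid.headD []).length with hn
      have hrange_ne : List.range n ≠ [] := by simpa [List.range_eq_nil] using hc0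
      have hcol_ne : pvColumns grid ≠ [] := by
        rw [hcolumns]
        simpa [List.map_eq_nil_iff, List.range_eq_nil] using hc0
      rw [if_neg hcol_ne]
      have hlen : (pvColumns grid).length = n := by rw [hcolumns]; simp
      rw [hlen]
      have hcnt : ∀ c ∈ List.range n,
          ((pvCnt5 (pvColumns grid) c : Nat) : Int) = (pvCounts grid).getD c 0 := by
        intro c hc
        have hc' := List.mem_range.mp hc
        unfold pvCnt5
        rw [hcolumns, PySem.List.getD_map_range _ _ _ _ hc', pv_count_col, pvCounts_getD _ _ hc']
      have hAmax : (pvMaxP (pvColCounts grid)).2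
          = PySem.List.min? (List.range n) (fun c => -((pvCnt5 (pvColumns grid) c : Nat) : Int)) := by
        rw [pvMax_eq, pv_max?_eq_min?_neg]
        exact pv_min?_congr _ _ _ (fun x hx => by rw [hcnt x hx])
      obtain ⟨M, hM⟩ : ∃ M, PySem.List.min? (List.range n)
          (fun c => -((pvCnt5 (pvColumns grid) c : Nat) : Int)) = some M := by
        cases hh : PySem.List.min? (List.range n)
            (fun c => -((pvCnt5 (pvColumns grid) c : Nat) : Int)) with
        | none => exact absurd ((PySem.List.min?_eq_none_iff _ _).mp hh) hrange_ne
        | some M => exact ⟨M, rfl⟩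
      cases hranked : PySem.List.sorted2 (List.range n)
          (fun c => -((pvCnt5 (pvColumns grid) c : Nat) : Int)) (fun c => c) with
      | nil =>
        rw [pv_sorted2_eq_sorted, PySem.List.sorted_eq_nil_iff] at hranked
        exact absurd hranked hrange_ne
      | cons r t =>
        have hrM : r = M := pv_head_sorted2 _ List.pairwise_lt_range _ M r t hM hranked
        have hhead : (r :: t).headD 0 = M := by rw [List.headD_cons, hrM]
        rw [hhead]
        have hElig : pvEligible (pvCounts grid) n (some M)
            = (List.range n).filter (fun c => decide (c ≠ M) && decide (0 < pvCnt5 (pvColumns grid) c)) := by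
          unfold pvEligible
          apply List.filter_congr
          intro x hx
          have h1 : ((pvCounts grid).getD x 0 > 0) ↔ (0 < pvCnt5 (pvColumns grid) x) := by
            rw [← hcnt x hx]
            exact Int.natCast_pos
          have e1 : decide ((pvCounts grid).getD x 0 > 0)
              = decide (0 < pvCnt5 (pvColumns grid) x) := decide_eq_decide.mpr h1
          have e2 : decide (some x ≠ some M) = decide (x ≠ M) := decide_eq_decide.mpr (by simp)
          rw [e1, e2, Bool.and_comm]
        have hAmin : (pvMinP (pvColCounts grid) (some M)).2
            = PySem.List.min? ((List.range n).filter
                (fun c => decide (c ≠ M) && decide (0 < pvCnt5 (pvColumns grid) c)))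
              (fun c => ((pvCnt5 (pvColumns grid) c : Nat) : Int)) := by
          rw [pvMin_eq, hElig]
          exact pv_min?_congr _ _ _
            (fun x hx => (hcnt x (List.mem_filter.mp hx).1).symm)
        have heligPW : ((List.range n).filter
            (fun c => decide (c ≠ M) && decide (0 < pvCnt5 (pvColumns grid) c))).Pairwise (· < ·) :=
          List.Pairwise.filter _ List.pairwise_lt_range
        cases hrest : PySem.List.sorted2 ((List.range n).filter
            (fun c => decide (c ≠ M) && decide (0 < pvCnt5 (pvColumns grid) c)))
            (fun c => ((pvCnt5 (pvColumns grid) c : Nat) : Int)) (fun c => c) with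
        | nil =>
          have heligN : (List.range n).filter
              (fun c => decide (c ≠ M) && decide (0 < pvCnt5 (pvColumns grid) c)) = [] := by
            rwa [pv_sorted2_eq_sorted, PySem.List.sorted_eq_nil_iff] at hrest
          have hminN : PySem.List.min? ((List.range n).filter
              (fun c => decide (c ≠ M) && decide (0 < pvCnt5 (pvColumns grid) c)))
              (fun c => ((pvCnt5 (pvColumns grid) c : Nat) : Int)) = none := by
            rw [heligN]; rfl
          rw [if_pos (rfl : ([] : List Nat) = [])]
          rw [hAmax, hM, hAmin, hminN]
          -- B side tail
          rw [hcolumns, pv_zipIdx_map_range]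
          simp only [List.map_map, Function.comp_def]
          rw [pvColumns_eq _ (by simpa [List.range_eq_nil] using hc0) grid.length
            (by rw [pv_headD_map_range _ _ _ hc0]; simp)
            (by intro s hs; obtain ⟨c, _, rfl⟩ := List.mem_map.mp hs; simp)]
          simp only [List.map_map, Function.comp_def]
          apply List.map_congr_left
          intro r hr
          have hr' := List.mem_range.mp hr
          apply List.map_congr_left
          intro c hc
          rw [pv_getD_map _ _ _ [] _ (by simpa using hr')]
          rw [pv_tbl1]
          by_cases h5 : (grid.getD r []).getD c 0 = 5
          · by_cases hcM : c = M <;> simp [hcM]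
          · simp
        | cons r2 t2 =>
          obtain ⟨m2, hm2⟩ : ∃ m2, PySem.List.min? ((List.range n).filter
              (fun c => decide (c ≠ M) && decide (0 < pvCnt5 (pvColumns grid) c)))
              (fun c => ((pvCnt5 (pvColumns grid) c : Nat) : Int)) = some m2 := by
            cases hh : PySem.List.min? ((List.range n).filter
                (fun c => decide (c ≠ M) && decide (0 < pvCnt5 (pvColumns grid) c)))
                (fun c => ((pvCnt5 (pvColumns grid) c : Nat) : Int)) with
            | none =>
              have hnil := (PySem.List.min?_eq_none_iff _ _).mp hh
              rw [hnil] at hrest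
              have : PySem.List.sorted2 ([] : List Nat)
                  (fun c => ((pvCnt5 (pvColumns grid) c : Nat) : Int)) (fun c => c) = [] := rfl
              rw [this] at hrest
              exact absurd hrest (by simp)
            | some m2 => exact ⟨m2, rfl⟩
          have hr2 : r2 = m2 := pv_head_sorted2 _ heligPW _ m2 r2 t2 hm2 hrest
          have hr2mem : m2 ∈ (List.range n).filter
              (fun c => decide (c ≠ M) && decide (0 < pvCnt5 (pvColumns grid) c)) :=
            PySem.List.min?_mem hm2
          have hr2M : m2 ≠ M := by
            have := (List.mem_filter.mp hr2mem).2
            simp only [Bool.and_eq_true, decide_eq_true_eq] at this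
            exact this.1
          rw [if_neg (List.cons_ne_nil r2 t2)]
          simp only [List.headD_cons]
          rw [hr2, hAmax, hM, hAmin, hm2]
          -- B side tail
          rw [hcolumns, pv_zipIdx_map_range]
          simp only [List.map_map, Function.comp_def]
          rw [pvColumns_eq _ (by simpa [List.range_eq_nil] using hc0) grid.length
            (by rw [pv_headD_map_range _ _ _ hc0]; simp)
            (by intro s hs; obtain ⟨c, _, rfl⟩ := List.mem_map.mp hs; simp)]
          simp only [List.map_map, Function.comp_def]
          apply List.map_congr_left
          intro r hr
          have hr' := List.mem_range.mp hr
          apply List.map_congr_left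
          intro c hc
          rw [pv_getD_map _ _ _ [] _ (by simpa using hr')]
          rw [pv_tbl2 _ _ _ hr2M]
          by_cases h5 : (grid.getD r []).getD c 0 = 5
          · by_cases hcM : c = M <;> by_cases hcr2 : c = m2 <;> simp [hcM, hcr2]
          · simp

-- ===== VERDICT (by name: the statement is the Claim_ definition above) =====
theorem transform_spec : Claim_equal_transform := by
  intro grid _ hpre
  unfold Spec_transform
  exact transform_equal grid hpre
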